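-- pv_equiv track=rewrite | github.com/rrrlw/advent-of-code | 2015/day20vibe.py | first_house_part1
-- ===== SOURCE A (Python) =====
-- def first_house_part1(target: int) -> int:
--     """
--     Part 1: Each elf e delivers 10*e presents to every house that is a multiple of e.
--     Find the smallest house number with at least `target` presents.
--     """
--     limit = max(1, target // 10)  # heuristic lower bound; we'll grow if needed
--     while True:
--         presents = [0] * (limit + 1)
--         for elf in range(1, limit + 1):
--             step = elf
--             add = 10 * elf
--             for house in range(elf, limit + 1, step):
--                 presents[house] += add
--         # find answer within current limit
--         for house in range(1, limit + 1):
--             if presents[house] >= target: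
--                 return house
--         # not found? double and try again
--         limit *= 2
-- ===== SOURCE B (Python) =====
-- def first_house_part1(target: int) -> int:
--     """
--     Part 1: Each elf e delivers 10*e presents to every house that is a multiple of e.
--     Find the smallest house number with at least `target` presents.
--     """
--     house = 1
--     while True:
--         # sum of divisors of `house` by paired trial division up to sqrt(house)
--         sigma = 0
--         d = 1
--         while d * d <= house:
--             if house % d == 0:
--                 sigma += d
--                 q = house // d
--                 if q != d:
--                     sigma += q
--             d += 1
--         if 10 * sigma >= target:
--             return house
--         house += 1
-- ===== Notes on version B (the rewrite author's own statement) =====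
-- stated objective: simpler
-- what changed: Replaced the growing sieve array plus limit-doubling retry loop by a direct ascending search over houses, computing each house's divisor sum by paired trial division up to its square root.
import Mathlib
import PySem

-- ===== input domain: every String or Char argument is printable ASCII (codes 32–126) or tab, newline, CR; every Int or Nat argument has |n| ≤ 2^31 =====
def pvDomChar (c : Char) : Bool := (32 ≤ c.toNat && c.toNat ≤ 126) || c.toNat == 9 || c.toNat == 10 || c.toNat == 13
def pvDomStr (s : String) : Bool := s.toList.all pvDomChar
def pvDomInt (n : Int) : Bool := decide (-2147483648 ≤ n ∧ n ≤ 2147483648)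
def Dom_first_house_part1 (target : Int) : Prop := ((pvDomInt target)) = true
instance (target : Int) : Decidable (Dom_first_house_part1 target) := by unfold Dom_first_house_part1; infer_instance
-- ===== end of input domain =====

-- B replaces A's growing sieve array and limit-doubling retry loop by a direct
-- ascending search over houses with a paired trial-division divisor sum (simpler).

-- ===== PORT A =====
-- inner loop 'for house in range(elf, limit+1, step): presents[house] += add'
def pvSieveElf (limit elf : Int) (p : List Int) : List Int :=
  (PySem.List.pyRange elf (limit + 1) elf).foldl
    (fun q house => q.set house.toNat (q[house.toNat]! + 10 * elf)) p

-- 'presents = [0]*(limit+1)' then the elf loop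
def pvSieve (limit : Int) : List Int :=
  (PySem.List.pyRange 1 (limit + 1) 1).foldl
    (fun p elf => pvSieveElf limit elf p) (List.replicate (limit + 1).toNat 0)

-- lemmas the port needs for termination (cited in decreasing_by) --
theorem pvGetBang (l : List Int) (i : Nat) (h : i < l.length) : l[i]! = l[i] := by
  simp [List.getElem!_eq_getElem?_getD, List.getElem?_eq_getElem h]

theorem pvSet_get_self (p : List Int) (i : Nat) (h : i < p.length) (v : Int) :
    (p.set i v)[i]! = v := by
  simp [List.getElem!_eq_getElem?_getD, List.getElem?_set_self h]

theorem pvSet_get_ne (p : List Int) (i j : Nat) (h : i ≠ j) (v : Int) :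
    (p.set i v)[j]! = p[j]! := by
  simp [List.getElem!_eq_getElem?_getD, List.getElem?_set_ne h]

theorem pvFoldSetAdd_mono (add : Int) (hadd : 0 ≤ add) (hs : List Int) :
    ∀ (p : List Int) (k : Nat), k < p.length →
      p[k]! ≤ (hs.foldl (fun q house => q.set house.toNat (q[house.toNat]! + add)) p)[k]! := by
  induction hs with
  | nil => intro p k hk; simp
  | cons h t ih =>
    intro p k hk
    simp only [List.foldl_cons]
    refine le_trans ?_ (ih (p.set h.toNat (p[h.toNat]! + add)) k (by simpa using hk))
    by_cases hek : h.toNat = k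
    · subst hek
      rw [pvSet_get_self p _ hk]
      omega
    · rw [pvSet_get_ne p _ _ hek]

theorem pvFoldSet_length (add : Int) (hs : List Int) :
    ∀ (p : List Int),
      (hs.foldl (fun q house => q.set house.toNat (q[house.toNat]! + add)) p).length = p.length := by
  induction hs with
  | nil => intro p; rfl
  | cons h t ih => intro p; simp only [List.foldl_cons]; rw [ih]; exact List.length_set

theorem pvSieveElf_length (limit elf : Int) (p : List Int) :
    (pvSieveElf limit elf p).length = p.length := by
  unfold pvSieveElf; exact pvFoldSet_length _ _ p

theorem pvSieveFold_length (limit : Int) (es : List Int) :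
    ∀ (p : List Int), (es.foldl (fun p elf => pvSieveElf limit elf p) p).length = p.length := by
  induction es with
  | nil => intro p; rfl
  | cons h t ih => intro p; simp only [List.foldl_cons]; rw [ih]; exact pvSieveElf_length _ _ _

theorem pvSieveFold_mono (limit : Int) (es : List Int) (hes : ∀ e ∈ es, 1 ≤ e) :
    ∀ (p : List Int) (k : Nat), k < p.length →
      p[k]! ≤ (es.foldl (fun p elf => pvSieveElf limit elf p) p)[k]! := by
  induction es with
  | nil => intro p k hk; simp
  | cons h t ih =>
    intro p k hk
    simp only [List.foldl_cons]
    refine le_trans ?_ (ih (fun e he => hes e (List.mem_cons_of_mem _ he))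
      (pvSieveElf limit h p) k (by rw [pvSieveElf_length]; exact hk))
    exact pvFoldSetAdd_mono (10 * h) (by have := hes h (List.mem_cons_self); omega) _ p k hk

theorem pvRange_self_singleton (limit : Int) (hl : 1 ≤ limit) :
    PySem.List.pyRange limit (limit + 1) limit = [limit] := by
  rw [PySem.List.pyRange_of_pos _ _ (by omega)]
  have h1 : (if limit < limit + 1 then ((limit + 1 - limit + limit - 1) / limit).toNat else 0) = 1 := by
    rw [if_pos (by omega)]
    have h2 : limit + 1 - limit + limit - 1 = limit := by ring
    rw [h2, Int.ediv_self (by omega)]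
    rfl
  rw [h1]
  simp [List.range_succ]

theorem pvSieve_lower (limit : Int) (hl : 1 ≤ limit) :
    10 * limit ≤ (pvSieve limit)[limit.toNat]! := by
  unfold pvSieve
  rw [show limit + 1 = limit + 1 by rfl]
  have hsplit : PySem.List.pyRange 1 (limit + 1) 1 = PySem.List.pyRange 1 limit 1 ++ [limit] :=
    PySem.List.pyRange_one_succ_right (by omega)
  rw [hsplit, List.foldl_append]
  set p0 : List Int := List.replicate (limit + 1).toNat 0 with hp0
  set p1 := (PySem.List.pyRange 1 limit 1).foldl (fun p elf => pvSieveElf limit elf p) p0 with hp1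
  have hlen0 : p0.length = (limit + 1).toNat := by simp [hp0]
  have hlen1 : p1.length = (limit + 1).toNat := by rw [hp1, pvSieveFold_length]; exact hlen0
  have hk : limit.toNat < p1.length := by rw [hlen1]; omega
  have h0 : (0:Int) ≤ p1[limit.toNat]! := by
    have := pvSieveFold_mono limit (PySem.List.pyRange 1 limit 1)
      (fun e he => (PySem.List.mem_pyRange_one.mp he).1) p0 limit.toNat (by rw [hlen0]; omega)
    rw [← hp1] at this
    refine le_trans ?_ this
    rw [pvGetBang _ _ (by rw [hlen0]; omega)]
    simp [hp0]
  simp only [List.foldl_cons, List.foldl_nil]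
  unfold pvSieveElf
  rw [pvRange_self_singleton limit hl]
  simp only [List.foldl_cons, List.foldl_nil]
  rw [pvGetBang _ _ (by rw [List.length_set]; exact hk), List.getElem_set_self (by rw [List.length_set]; exact hk)]
  rw [pvGetBang _ _ hk] at h0 ⊢
  omega

-- 'while True:' with the doubling retry; the inner scan
-- 'for house in range(1, limit+1): if presents[house] >= target: return house'
def pvALoop (target limit : Int) (hl : 1 ≤ limit) : Int :=
  match hfind : (PySem.List.pyRange 1 (limit + 1) 1).find?
      (fun house => decide (target ≤ (pvSieve limit)[house.toNat]!)) with
  | some house => house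
  | none => pvALoop target (limit * 2) (by omega)
termination_by (target - 10 * limit).toNat
decreasing_by
  have hm : limit ∈ PySem.List.pyRange 1 (limit + 1) 1 :=
    PySem.List.mem_pyRange_one.mpr (by omega)
  have hne := List.find?_eq_none.mp hfind limit hm
  have hlt : (pvSieve limit)[limit.toNat]! < target := by
    by_contra hc
    exact hne (by simpa using not_lt.mp hc)
  have hlow := pvSieve_lower limit hl
  omega

def first_house_part1 (target : Int) : Int :=
  pvALoop target (max 1 (PySem.Int.floordiv target 10)) (le_max_left 1 _)

-- ===== PORT B =====
-- termination lemmas for the B loops, cited in decreasing_by --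
theorem pvSqStep (d : Int) (hd : 1 ≤ d) : d * d < (d + 1) * (d + 1) := by nlinarith

-- 'while d*d <= house: if house % d == 0: sigma += d; q = house//d; if q != d: sigma += q; d += 1'
def pvSigmaLoop (house : Int) (d : Int) (hd : 1 ≤ d) (sigma : Int) : Int :=
  if hc : d * d ≤ house then
    pvSigmaLoop house (d + 1) (by omega)
      (if PySem.Int.mod house d = 0 then
        (if PySem.Int.floordiv house d ≠ d then sigma + d + PySem.Int.floordiv house d
         else sigma + d)
       else sigma)
  else sigma
termination_by (house + 1 - d * d).toNat
decreasing_by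
  have := pvSqStep d hd
  omega

-- one-step unfolding, proved once so later proofs can cite it by name
theorem pvSigmaLoop_eq (house d : Int) (hd : 1 ≤ d) (sigma : Int) :
    pvSigmaLoop house d hd sigma =
      if hc : d * d ≤ house then
        pvSigmaLoop house (d + 1) (by omega)
          (if PySem.Int.mod house d = 0 then
            (if PySem.Int.floordiv house d ≠ d then sigma + d + PySem.Int.floordiv house d
             else sigma + d)
           else sigma)
      else sigma := by
  rw [pvSigmaLoop]

theorem pvFloordiv_nonneg (house d : Int) (hh : 1 ≤ house) (hd : 1 ≤ d) :
    0 ≤ PySem.Int.floordiv house d := by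
  rw [PySem.Int.floordiv_eq_ediv_of_pos (by omega)]
  exact Int.ediv_nonneg (by omega) (by omega)

theorem pvSigmaLoop_ge_acc_fuel (house : Int) (hh : 1 ≤ house) :
    ∀ (n : Nat) (d : Int) (hd : 1 ≤ d) (sigma : Int), (house + 1 - d * d).toNat ≤ n →
      sigma ≤ pvSigmaLoop house d hd sigma := by
  intro n
  induction n with
  | zero =>
    intro d hd sigma hn
    rw [pvSigmaLoop_eq, dif_neg (by omega)]
  | succ m ih =>
    intro d hd sigma hn
    rw [pvSigmaLoop_eq]
    by_cases hc : d * d ≤ house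
    · rw [dif_pos hc]
      refine le_trans ?_ (ih (d + 1) (by omega) _ (by have := pvSqStep d hd; omega))
      have hq := pvFloordiv_nonneg house d hh hd
      split_ifs <;> omega
    · rw [dif_neg hc]

theorem pvSigmaLoop_ge_acc (house : Int) (hh : 1 ≤ house) :
    ∀ (d : Int) (hd : 1 ≤ d) (sigma : Int), sigma ≤ pvSigmaLoop house d hd sigma := by
  intro d hd sigma
  exact pvSigmaLoop_ge_acc_fuel house hh (house + 1 - d * d).toNat d hd sigma (le_refl _)

theorem pvSigma_ge_self (house : Int) (hh : 1 ≤ house) :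
    house ≤ pvSigmaLoop house 1 (le_refl 1) 0 := by
  rw [pvSigmaLoop_eq, dif_pos (by omega : (1:Int) * 1 ≤ house)]
  have hmod : PySem.Int.mod house 1 = 0 := (PySem.Int.mod_eq_zero_iff_dvd house 1).mpr (one_dvd house)
  have hq : PySem.Int.floordiv house 1 = house := by
    rw [PySem.Int.floordiv_eq_ediv_of_pos (by omega)]
    exact Int.ediv_one house
  rw [if_pos hmod]
  refine le_trans ?_ (pvSigmaLoop_ge_acc house hh 2 (by omega) _)
  simp only [hq]
  split_ifs <;> omega

-- 'while True: sigma = ...; if 10*sigma >= target: return house; house += 1'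
def pvHouseLoop (target house : Int) (hh : 1 ≤ house) : Int :=
  if target ≤ 10 * pvSigmaLoop house 1 (le_refl 1) 0 then house
  else pvHouseLoop target (house + 1) (by omega)
termination_by (target - 10 * house).toNat
decreasing_by
  have hs := pvSigma_ge_self house hh
  omega

def first_house_part1_alt (target : Int) : Int :=
  pvHouseLoop target 1 (le_refl 1)

-- ===== PRECONDITION & SPEC =====
def Spec_first_house_part1 (target : Int) (out : Int) : Prop := out = first_house_part1_alt target
instance (target : Int) (out : Int) : Decidable (Spec_first_house_part1 target out) := by unfold Spec_first_house_part1; infer_instance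

-- ===== CLAIM (what is proved, stated in full; the proofs are below) =====
def Claim_equal_first_house_part1 : Prop := ∀ (target : Int), Dom_first_house_part1 target → Spec_first_house_part1 target (first_house_part1 target)

-- ===== LEMMAS AND PROOFS =====

-- reference divisor sum: sum of the divisors of h, as an indicator sum over [1, h]
def pvRefSum (h : Int) : Int :=
  ∑ e ∈ Finset.Icc 1 h.toNat, (if (e : Int) ∣ h then (e : Int) else 0)

-- B computes pvRefSum --------------------------------------------------------
theorem pvIccBot (a b : Nat) (h : a ≤ b) (f : Nat → Int) :
    ∑ e ∈ Finset.Icc a b, f e = f a + ∑ e ∈ Finset.Icc (a + 1) b, f e := by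
  have he : Finset.Icc a b = insert a (Finset.Icc (a + 1) b) := by
    ext x; simp only [Finset.mem_Icc, Finset.mem_insert]; omega
  rw [he, Finset.sum_insert (by simp [Finset.mem_Icc])]

theorem pvSigmaLoop_spec (house : Int) (hh : 1 ≤ house) :
    ∀ (d : Int) (hd : 1 ≤ d) (sigma : Int),
      pvSigmaLoop house d hd sigma =
        sigma + ∑ e ∈ Finset.Icc d.toNat (Nat.sqrt house.toNat),
          (if (e : Int) ∣ house then
            (e : Int) + (if PySem.Int.floordiv house e ≠ (e : Int) then PySem.Int.floordiv house e else 0)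
          else 0) := by
  intro d hd sigma
  fun_induction pvSigmaLoop house d hd sigma with
  | case1 d hd sigma hc ih =>
    simp only [dite_eq_ite] at ih
    rw [ih]
    have hdt : ((d.toNat : Nat) : Int) = d := by omega
    have hdr : d.toNat ≤ Nat.sqrt house.toNat := by
      rw [Nat.le_sqrt]
      have h2 : ((d.toNat * d.toNat : Nat) : Int) ≤ ((house.toNat : Nat) : Int) := by
        push_cast
        rw [hdt]
        omega
      exact_mod_cast h2
    rw [pvIccBot d.toNat (Nat.sqrt house.toNat) hdr]
    have hdvd : PySem.Int.mod house d = 0 ↔ ((d.toNat : Nat) : Int) ∣ house := by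
      rw [hdt]; exact PySem.Int.mod_eq_zero_iff_dvd house d
    have harg : (d.toNat : Nat) + 1 = (d + 1).toNat := by omega
    rw [harg]
    by_cases hm : PySem.Int.mod house d = 0
    · rw [if_pos hm, if_pos (hdvd.mp hm)]
      rw [hdt]
      by_cases hq : PySem.Int.floordiv house d ≠ d
      · rw [if_pos hq, if_pos hq]; ring
      · rw [if_neg hq, if_neg hq]; ring
    · rw [if_neg hm, if_neg (fun hx => hm (hdvd.mpr hx))]
      ring
  | case2 d hd sigma hc =>
    have hlt : Nat.sqrt house.toNat < d.toNat := by
      have hdt : ((d.toNat : Nat) : Int) = d := by omega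
      have h1 : house.toNat < d.toNat * d.toNat := by
        have h2 : ((house.toNat : Nat) : Int) < ((d.toNat * d.toNat : Nat) : Int) := by
          push_cast
          rw [hdt]
          omega
        exact_mod_cast h2
      exact Nat.sqrt_lt.mpr h1
    rw [Finset.Icc_eq_empty (by omega), Finset.sum_empty, add_zero]

-- Nat-level pairing: divisors up to √n paired with their codivisors cover all divisors
theorem pvPairingNat (n : Nat) (hn : 1 ≤ n) :
    (∑ e ∈ Finset.Icc 1 (Nat.sqrt n),
      (if e ∣ n then (e : Int) + (if n / e ≠ e then ((n / e : Nat) : Int) else (0 : Int)) else 0)) =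
    ∑ e ∈ Finset.Icc 1 n, (if e ∣ n then (e : Int) else 0) := by
  set r := Nat.sqrt n with hr
  have hrr : r * r ≤ n := Nat.sqrt_le n
  have hrn : n < (r + 1) * (r + 1) := Nat.lt_succ_sqrt n
  set D : Finset Nat := (Finset.Icc 1 n).filter (· ∣ n) with hD
  set S : Finset Nat := D.filter (· ≤ r) with hS
  set L : Finset Nat := D.filter (¬ · ≤ r) with hL
  have hmemD : ∀ x, x ∈ D ↔ (x ∣ n ∧ 1 ≤ x) := by
    intro x
    simp only [hD, Finset.mem_filter, Finset.mem_Icc]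
    constructor
    · rintro ⟨⟨h1, _⟩, h2⟩; exact ⟨h2, h1⟩
    · rintro ⟨h1, h2⟩; exact ⟨⟨h2, Nat.le_of_dvd (by omega) h1⟩, h1⟩
  -- LHS: sum over small divisors of (e + paired codivisor)
  have hLHS : (∑ e ∈ Finset.Icc 1 r,
      (if e ∣ n then (e : Int) + (if n / e ≠ e then ((n / e : Nat) : Int) else (0 : Int)) else 0)) =
      (∑ e ∈ S, (e : Int)) + ∑ e ∈ S.filter (fun e => n / e ≠ e), ((n / e : Nat) : Int) := by
    rw [← Finset.sum_filter]
    have hSeq : (Finset.Icc 1 r).filter (· ∣ n) = S := by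
      ext x
      simp only [hS, Finset.mem_filter, Finset.mem_Icc, hmemD x]
      constructor
      · rintro ⟨⟨h1, h2⟩, h3⟩; exact ⟨⟨h3, h1⟩, h2⟩
      · rintro ⟨⟨h1, h2⟩, h3⟩; exact ⟨⟨h2, h3⟩, h1⟩
    rw [hSeq, Finset.sum_add_distrib]
    congr 1
    rw [← Finset.sum_filter]
  rw [hLHS]
  -- the paired codivisors are exactly the large divisors
  have hbij : (∑ e ∈ S.filter (fun e => n / e ≠ e), ((n / e : Nat) : Int)) = ∑ e ∈ L, (e : Int) := by
    refine Finset.sum_nbij' (fun d => n / d) (fun e => n / e) ?_ ?_ ?_ ?_ ?_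
    · intro d hd
      simp only [Finset.mem_filter, hS] at hd
      obtain ⟨⟨hdD, hdr⟩, hdne⟩ := hd
      obtain ⟨hdvd, hd1⟩ := (hmemD d).mp hdD
      have hnd : n / d ∣ n := Nat.div_dvd_of_dvd hdvd
      have hnd1 : 1 ≤ n / d := Nat.one_le_div_iff (by omega) |>.mpr (Nat.le_of_dvd (by omega) hdvd)
      have hbig : ¬ (n / d ≤ r) := by
        intro hsmall
        have hmul : d * (n / d) = n := Nat.mul_div_cancel' hdvd
        have h1 : n ≤ r * r := by calc n = d * (n / d) := hmul.symm
                                       _ ≤ r * r := Nat.mul_le_mul hdr hsmall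
        have hnr : n = r * r := le_antisymm h1 hrr
        have hd_eq : d = r ∧ n / d = r := by
          constructor
          · by_contra hne
            have hlt : d < r := lt_of_le_of_ne hdr hne
            have : d * (n / d) < r * r := by nlinarith
            omega
          · by_contra hne
            have hlt : n / d < r := lt_of_le_of_ne hsmall hne
            have : d * (n / d) < r * r := by nlinarith
            omega
        exact hdne (by omega)
      simp only [hL, Finset.mem_filter]
      exact ⟨(hmemD _).mpr ⟨hnd, hnd1⟩, hbig⟩
    · intro e he
      simp only [hL, Finset.mem_filter] at he
      obtain ⟨heD, her⟩ := he
      obtain ⟨hedvd, he1⟩ := (hmemD e).mp heD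
      have hne : n / e ∣ n := Nat.div_dvd_of_dvd hedvd
      have hne1 : 1 ≤ n / e := Nat.one_le_div_iff (by omega) |>.mpr (Nat.le_of_dvd (by omega) hedvd)
      have hsmall : n / e ≤ r := by
        have h1 : n / e ≤ n / (r + 1) := Nat.div_le_div_left (by omega) (by omega)
        have h2 : n / (r + 1) < r + 1 := (Nat.div_lt_iff_lt_mul (by omega)).mpr hrn
        omega
      have hrec : n / (n / e) = e := Nat.div_div_self hedvd (by omega)
      simp only [Finset.mem_filter, hS]
      refine ⟨⟨(hmemD _).mpr ⟨hne, hne1⟩, hsmall⟩, ?_⟩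
      rw [hrec]; omega
    · intro d hd
      simp only [Finset.mem_filter, hS] at hd
      exact Nat.div_div_self ((hmemD d).mp hd.1.1).1 (by omega)
    · intro e he
      simp only [hL, Finset.mem_filter] at he
      exact Nat.div_div_self ((hmemD e).mp he.1).1 (by omega)
    · intro d _; rfl
  rw [hbij]
  -- small + large divisors = all divisors
  have hsplit : (∑ e ∈ S, (e : Int)) + ∑ e ∈ L, (e : Int) = ∑ e ∈ D, (e : Int) :=
    Finset.sum_filter_add_sum_filter_not D (· ≤ r) _
  rw [hsplit, hD, Finset.sum_filter]

theorem pvPairing (house : Int) (hh : 1 ≤ house) :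
    (∑ e ∈ Finset.Icc 1 (Nat.sqrt house.toNat),
      (if (e : Int) ∣ house then
        (e : Int) + (if PySem.Int.floordiv house e ≠ (e : Int) then PySem.Int.floordiv house e else 0)
      else 0)) = pvRefSum house := by
  obtain ⟨n, hn⟩ : ∃ n : Nat, house = (n : Int) := ⟨house.toNat, by omega⟩
  subst hn
  have hn1 : 1 ≤ n := by exact_mod_cast hh
  unfold pvRefSum
  rw [Int.toNat_natCast]
  have hL : (∑ e ∈ Finset.Icc 1 (Nat.sqrt n),
      (if (e : Int) ∣ (n : Int) then
        (e : Int) + (if PySem.Int.floordiv (n : Int) (e : Int) ≠ (e : Int) then PySem.Int.floordiv (n : Int) (e : Int) else 0)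
      else 0)) = ∑ e ∈ Finset.Icc 1 (Nat.sqrt n),
      (if e ∣ n then (e : Int) + (if n / e ≠ e then ((n / e : Nat) : Int) else (0 : Int)) else 0) := by
    refine Finset.sum_congr rfl ?_
    intro e he
    simp only [Finset.mem_Icc] at he
    have hdvd : ((e : Int) ∣ (n : Int)) ↔ e ∣ n := Int.natCast_dvd_natCast
    have he1 : 1 ≤ e := he.1
    have hfd : PySem.Int.floordiv (n : Int) (e : Int) = ((n / e : Nat) : Int) := by
      rw [PySem.Int.floordiv_eq_ediv_of_pos (by exact_mod_cast (by omega : 0 < e))]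
      exact (Int.natCast_div n e).symm
    by_cases hd : e ∣ n
    · rw [if_pos (hdvd.mpr hd), if_pos hd, hfd]
      have hiff : ((n / e : Nat) : Int) ≠ (e : Int) ↔ n / e ≠ e := by
        constructor
        · intro h1 h2; exact h1 (by exact_mod_cast h2)
        · intro h1 h2; exact h1 (by exact_mod_cast h2)
      by_cases hq : n / e ≠ e
      · rw [if_pos (hiff.mpr hq), if_pos hq]
      · rw [if_neg (fun hx => hq (hiff.mp hx)), if_neg hq]
    · rw [if_neg (fun hx => hd (hdvd.mp hx)), if_neg hd]
  have hR : (∑ e ∈ Finset.Icc 1 n, (if e ∣ n then (e : Int) else 0)) =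
      ∑ e ∈ Finset.Icc 1 n, (if (e : Int) ∣ (n : Int) then (e : Int) else 0) := by
    refine Finset.sum_congr rfl ?_
    intro e _
    by_cases hd : e ∣ n
    · rw [if_pos hd, if_pos (Int.natCast_dvd_natCast.mpr hd)]
    · rw [if_neg hd, if_neg (fun hx => hd (Int.natCast_dvd_natCast.mp hx))]
  rw [hL, pvPairingNat n hn1, hR]

theorem pvSigma_eq_refSum (house : Int) (hh : 1 ≤ house) :
    pvSigmaLoop house 1 (le_refl 1) 0 = pvRefSum house := by
  rw [pvSigmaLoop_spec house hh 1 (le_refl 1) 0, zero_add]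
  exact pvPairing house hh

-- A's sieve computes 10 * pvRefSum ------------------------------------------
theorem pvFoldSetAdd_get (add : Int) :
    ∀ (hs : List Int) (p : List Int) (k : Nat), hs.Nodup →
      (∀ x ∈ hs, 0 ≤ x ∧ x.toNat < p.length) → k < p.length →
      (hs.foldl (fun q house => q.set house.toNat (q[house.toNat]! + add)) p)[k]! =
        p[k]! + (if (k : Int) ∈ hs then add else 0) := by
  intro hs
  induction hs with
  | nil => intro p k _ _ _; simp
  | cons h t ih =>
    intro p k hnd hbnd hk
    obtain ⟨hh0, hhlen⟩ := hbnd h (List.mem_cons_self)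
    simp only [List.foldl_cons]
    rw [ih (p.set h.toNat (p[h.toNat]! + add)) k (List.nodup_cons.mp hnd).2
      (fun x hx => ⟨(hbnd x (List.mem_cons_of_mem _ hx)).1, by
        rw [List.length_set]; exact (hbnd x (List.mem_cons_of_mem _ hx)).2⟩)
      (by rw [List.length_set]; exact hk)]
    by_cases heq : (k : Int) = h
    · have hkh : h.toNat = k := by omega
      rw [hkh, pvSet_get_self p k hk]
      have hnt : (k : Int) ∉ t := by rw [heq]; exact (List.nodup_cons.mp hnd).1
      rw [if_neg hnt, if_pos (by rw [heq]; exact List.mem_cons_self)]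
      ring
    · have hkh : h.toNat ≠ k := by omega
      rw [pvSet_get_ne p _ _ hkh]
      have hmem : ((k : Int) ∈ h :: t) ↔ ((k : Int) ∈ t) := by
        simp [List.mem_cons, heq]
      rw [if_congr hmem rfl rfl]

theorem pvSieveElf_get (limit elf : Int) (he : 1 ≤ elf) (p : List Int)
    (hp : p.length = (limit + 1).toNat) (k : Nat) (hk : k < p.length) :
    (pvSieveElf limit elf p)[k]! =
      p[k]! + (if elf ≤ (k : Int) ∧ (k : Int) ≤ limit ∧ elf ∣ (k : Int) then 10 * elf else 0) := by
  unfold pvSieveElf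
  have hnd : (PySem.List.pyRange elf (limit + 1) elf).Nodup := by
    rw [PySem.List.pyRange_of_pos _ _ (by omega)]
    refine List.Nodup.map ?_ List.nodup_range
    intro a b hab
    have h2 : elf * (a : Int) = elf * (b : Int) := by linarith
    have h3 := mul_left_cancel₀ (show elf ≠ 0 by omega) h2
    exact_mod_cast h3
  have hbnd : ∀ x ∈ PySem.List.pyRange elf (limit + 1) elf, 0 ≤ x ∧ x.toNat < p.length := by
    intro x hx
    obtain ⟨h1, h2, _⟩ := (PySem.List.mem_pyRange_iff_of_pos (by omega) x).mp hx
    exact ⟨by omega, by omega⟩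
  rw [pvFoldSetAdd_get (10 * elf) _ p k hnd hbnd hk]
  have hiff : ((k : Int) ∈ PySem.List.pyRange elf (limit + 1) elf) ↔
      (elf ≤ (k : Int) ∧ (k : Int) ≤ limit ∧ elf ∣ (k : Int)) := by
    rw [PySem.List.mem_pyRange_iff_of_pos (by omega)]
    constructor
    · rintro ⟨h1, h2, h3⟩
      refine ⟨h1, by omega, ?_⟩
      have hr : (k : Int) = ((k : Int) - elf) + elf := by ring
      rw [hr]
      exact dvd_add h3 dvd_rfl
    · rintro ⟨h1, h2, h3⟩
      exact ⟨h1, by omega, dvd_sub h3 dvd_rfl⟩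
  rw [if_congr hiff rfl rfl]

theorem pvSieveFold_get (limit : Int) :
    ∀ (es : List Int) (p : List Int) (k : Nat), (∀ e ∈ es, 1 ≤ e) →
      p.length = (limit + 1).toNat → k < p.length →
      (es.foldl (fun p elf => pvSieveElf limit elf p) p)[k]! =
        p[k]! + (es.map
          (fun e => if e ≤ (k : Int) ∧ (k : Int) ≤ limit ∧ e ∣ (k : Int) then 10 * e else 0)).sum := by
  intro es
  induction es with
  | nil => intro p k _ _ _; simp
  | cons h t ih =>
    intro p k hes hp hk
    simp only [List.foldl_cons, List.map_cons, List.sum_cons]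
    rw [ih (pvSieveElf limit h p) k (fun e he => hes e (List.mem_cons_of_mem _ he))
      (by rw [pvSieveElf_length]; exact hp) (by rw [pvSieveElf_length]; exact hk)]
    rw [pvSieveElf_get limit h (hes h List.mem_cons_self) p hp k hk]
    ring

theorem pvListSumRange (f : Nat → Int) (n : Nat) :
    ((List.range n).map f).sum = ∑ j ∈ Finset.range n, f j := by
  induction n with
  | zero => simp
  | succ m ih => rw [List.range_succ, Finset.sum_range_succ, List.map_append, List.sum_append, ih]; simp

theorem pvSieve_get (limit h : Int) (h1 : 1 ≤ h) (h2 : h ≤ limit) :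
    (pvSieve limit)[h.toNat]! = 10 * pvRefSum h := by
  unfold pvSieve
  have hlen : (List.replicate (limit + 1).toNat (0 : Int)).length = (limit + 1).toNat := by simp
  have hk : h.toNat < (List.replicate (limit + 1).toNat (0 : Int)).length := by rw [hlen]; omega
  rw [pvSieveFold_get limit (PySem.List.pyRange 1 (limit + 1) 1)
    (List.replicate (limit + 1).toNat 0) h.toNat
    (fun e he => (PySem.List.mem_pyRange_one.mp he).1) hlen hk]
  have hrep : (List.replicate (limit + 1).toNat (0 : Int))[h.toNat]! = 0 := by
    rw [pvGetBang _ _ hk]; simp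
  rw [hrep, zero_add]
  rw [PySem.List.pyRange_one 1 (limit + 1)]
  have hsub1 : (limit + 1 - 1 : Int) = limit := by ring
  rw [hsub1, List.map_map, pvListSumRange]
  simp only [Function.comp_apply]
  unfold pvRefSum
  rw [Finset.mul_sum]
  simp only [mul_ite, mul_zero]
  have hcast : ((h.toNat : Nat) : Int) = h := by omega
  rw [← Finset.Ico_add_one_right_eq_Icc, Finset.sum_Ico_eq_sum_range]
  simp only [Nat.add_sub_cancel]
  have hsub : Finset.range h.toNat ⊆ Finset.range limit.toNat := by
    intro x hx
    simp only [Finset.mem_range] at hx ⊢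
    omega
  have hzero : ∀ j ∈ Finset.range limit.toNat, j ∉ Finset.range h.toNat →
      (if 1 + (j : Int) ≤ ((h.toNat : Nat) : Int) ∧ ((h.toNat : Nat) : Int) ≤ limit ∧
          (1 + (j : Int)) ∣ ((h.toNat : Nat) : Int) then 10 * (1 + (j : Int)) else 0) = 0 := by
    intro j _ hj2
    rw [if_neg]
    rintro ⟨hc1, _, _⟩
    simp only [Finset.mem_range] at hj2
    omega
  rw [← Finset.sum_subset hsub hzero]
  refine Finset.sum_congr rfl ?_
  intro j hj
  simp only [Finset.mem_range] at hj
  have hc1 : (1 : Int) + (j : Int) ≤ ((h.toNat : Nat) : Int) := by omega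
  have hcastj : ((1 + j : Nat) : Int) = 1 + (j : Int) := by push_cast; ring
  by_cases hd : (1 + (j : Int)) ∣ h
  · rw [if_pos ⟨hc1, by omega, by rw [hcast]; exact hd⟩, if_pos (by rw [hcastj]; exact hd), hcastj]
  · rw [if_neg (by rintro ⟨_, _, hx⟩; rw [hcast] at hx; exact hd hx),
      if_neg (by rw [hcastj]; exact hd)]

-- least-house characterisation ----------------------------------------------
def pvP (target h : Int) : Prop := target ≤ 10 * pvRefSum h

def pvLeast (target x : Int) : Prop :=
  1 ≤ x ∧ pvP target x ∧ ∀ m, 1 ≤ m → m < x → ¬ pvP target m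

theorem pvLeast_unique (target x y : Int) (hx : pvLeast target x) (hy : pvLeast target y) :
    x = y := by
  obtain ⟨hx1, hx2, hx3⟩ := hx
  obtain ⟨hy1, hy2, hy3⟩ := hy
  rcases lt_trichotomy x y with h | h | h
  · exact absurd hx2 (hy3 x hx1 h)
  · exact h
  · exact absurd hy2 (hx3 y hy1 h)

theorem pvFind_some (pred : Int → Bool) :
    ∀ (a b h : Int), (PySem.List.pyRange a b 1).find? pred = some h →
      a ≤ h ∧ h < b ∧ pred h = true ∧ ∀ m, a ≤ m → m < h → pred m = false := by
  have key : ∀ (n : Nat) (a b h : Int), (b - a).toNat ≤ n →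
      (PySem.List.pyRange a b 1).find? pred = some h →
      a ≤ h ∧ h < b ∧ pred h = true ∧ ∀ m, a ≤ m → m < h → pred m = false := by
    intro n
    induction n with
    | zero =>
      intro a b h hn hf
      rw [PySem.List.pyRange_one_eq_nil (by omega)] at hf
      simp at hf
    | succ n ih =>
      intro a b h hn hf
      by_cases hab : a < b
      · rw [PySem.List.pyRange_one_cons hab] at hf
        by_cases hpa : pred a = true
        · rw [List.find?_cons_of_pos hpa] at hf
          obtain rfl : a = h := by injection hf
          exact ⟨le_refl a, hab, hpa, fun m hm1 hm2 => absurd hm2 (by omega)⟩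
        · have hpa' : pred a = false := by
            cases hq : pred a
            · rfl
            · exact absurd hq hpa
          rw [List.find?_cons_of_neg (by simp [hpa'])] at hf
          obtain ⟨h1, h2, h3, h4⟩ := ih (a + 1) b h (by omega) hf
          refine ⟨by omega, h2, h3, ?_⟩
          intro m hm1 hm2
          by_cases hma : m = a
          · subst hma; exact hpa'
          · exact h4 m (by omega) hm2
      · rw [PySem.List.pyRange_one_eq_nil (by omega)] at hf
        simp at hf
  intro a b h hf
  exact key (b - a).toNat a b h (le_refl _) hf

theorem pvHouseLoop_least (target : Int) :
    ∀ (house : Int) (hh : 1 ≤ house), (∀ m, 1 ≤ m → m < house → ¬ pvP target m) →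
      pvLeast target (pvHouseLoop target house hh) := by
  intro house hh
  fun_induction pvHouseLoop target house hh with
  | case1 house hh hc =>
    intro hmin
    exact ⟨hh, by unfold pvP; rw [← pvSigma_eq_refSum house hh]; exact hc, hmin⟩
  | case2 house hh hc ih =>
    intro hmin
    apply ih
    intro m h1 h2
    by_cases hmh : m = house
    · subst hmh
      unfold pvP
      rw [← pvSigma_eq_refSum m h1]
      exact hc
    · exact hmin m h1 (by omega)

theorem pvALoop_least (target : Int) :
    ∀ (limit : Int) (hl : 1 ≤ limit), pvLeast target (pvALoop target limit hl) := by
  intro limit hl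
  fun_induction pvALoop target limit hl with
  | case1 limit hl house hfind =>
    obtain ⟨h1, h2, h3, h4⟩ := pvFind_some _ 1 (limit + 1) house hfind
    have hple : house ≤ limit := by omega
    refine ⟨h1, ?_, ?_⟩
    · unfold pvP
      have h5 := of_decide_eq_true h3
      rwa [pvSieve_get limit house h1 hple] at h5
    · intro m hm1 hm2
      have h5 := h4 m hm1 hm2
      unfold pvP
      intro hP
      refine of_decide_eq_false h5 ?_
      rw [pvSieve_get limit m hm1 (by omega)]
      exact hP
  | case2 limit hl hfind ih => exact ih

-- ===== VERDICT (by name: the statement is the Claim_ definition above) =====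
theorem first_house_part1_spec : Claim_equal_first_house_part1 := by
  intro target _
  unfold Spec_first_house_part1 first_house_part1 first_house_part1_alt
  exact pvLeast_unique target _ _ (pvALoop_least target _ _)
    (pvHouseLoop_least target 1 (le_refl 1) (by intro m h1 h2 _; omega))
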